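-- pv_equiv track=rewrite | github.com/solokeys/openpgp | pytest/ecdsa_keys.py | hex_oid_to_string
-- ===== SOURCE A (Python) =====
-- def hex_oid_to_string(oid):
--     if len(oid) < 3:
--         return ""
--
--     o1 = int(oid[0] / 40)
--     o2 = int(oid[0] % 40)
--     if o1 > 2:
--         o2 += (o1 - 2) * 40
--         o1 = 2
--     soid = str(o1) + "." + str(o2)
--
--     val = 0
--     for c in oid[1:]:
--         val = ((val << 7) | (c & 0x7F))
--         if c < 0x80:
--             soid += "." + str(val)
--             val = 0
--     return soid
-- ===== SOURCE B (Python) =====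
-- def hex_oid_to_string(oid):
--     if len(oid) < 3:
--         return ""
--
--     o1 = int(oid[0] / 40)
--     o2 = oid[0] % 40
--     if o1 > 2:
--         o2 += (o1 - 2) * 40
--         o1 = 2
--
--     # Partition the tail into complete base-128 groups, cutting after each
--     # byte whose continuation bit is clear; an unfinished trailing group is dropped.
--     groups = []
--     cur = []
--     for c in oid[1:]:
--         cur.append(c)
--         if c < 0x80:
--             groups.append(cur)
--             cur = []
--
--     def decode(g):
--         v = 0
--         for c in g:
--             v = (v << 7) | (c & 0x7F)
--         return v
--
--     return ".".join([str(o1), str(o2)] + [str(decode(g)) for g in groups])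
-- ===== Notes on version B (the rewrite author's own statement) =====
-- stated objective: alternative
-- what changed: A interleaves decoding and string building in one loop with a running val; B first partitions the tail into complete base-128 groups (dropping an unfinished trailing group), decodes each group independently, and joins all arcs with '.'.
import Mathlib
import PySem

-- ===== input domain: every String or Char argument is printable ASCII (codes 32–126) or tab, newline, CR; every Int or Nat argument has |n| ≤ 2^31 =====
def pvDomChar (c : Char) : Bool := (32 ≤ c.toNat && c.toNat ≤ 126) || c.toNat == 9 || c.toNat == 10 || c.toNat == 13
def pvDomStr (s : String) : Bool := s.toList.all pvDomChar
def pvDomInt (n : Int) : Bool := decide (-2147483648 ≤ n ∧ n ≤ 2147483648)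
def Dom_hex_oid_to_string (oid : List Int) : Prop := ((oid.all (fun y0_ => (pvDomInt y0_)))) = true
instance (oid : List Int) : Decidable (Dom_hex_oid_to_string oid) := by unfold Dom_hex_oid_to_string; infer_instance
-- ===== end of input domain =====

-- B decodes the OID tail by first partitioning it into complete base-128 groups and then
-- joining the decoded arcs with '.', instead of A's inline string accumulation; objective: alternative decomposition.

-- ===== PORT A =====
-- one step of A's for-loop over oid[1:], state (soid, val)
def hexAStep (st : String × Int) (c : Int) : String × Int :=
  let val := PySem.Int.bor (st.2 <<< (7 : Nat)) (PySem.Int.band c 127)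
  if c < 128 then (st.1 ++ "." ++ PySem.Int.toStr val, 0) else (st.1, val)

def hex_oid_to_string (oid : List Int) : String :=
  if oid.length < 3 then "" else
    let c0 := PySem.List.pyGetD oid 0 0      -- oid[0]; in range since len(oid) ≥ 3
    -- int(oid[0] / 40): the float quotient truncated toward zero; exact (= Int.tdiv) for |oid[0]| ≤ 2^31
    let o1 := Int.tdiv c0 40
    let o2 := PySem.Int.mod c0 40            -- int(oid[0] % 40), Python floor mod
    let p := if o1 > 2 then ((2 : Int), o2 + (o1 - 2) * 40) else (o1, o2)
    let soid := PySem.Int.toStr p.1 ++ "." ++ PySem.Int.toStr p.2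
    ((PySem.List.slice oid (some 1) none).foldl hexAStep (soid, 0)).1

-- ===== PORT B =====
-- one step of B's grouping loop, state (groups, cur)
def hexBGroupStep (st : List (List Int) × List Int) (c : Int) : List (List Int) × List Int :=
  let cur := st.2 ++ [c]
  if c < 128 then (st.1 ++ [cur], ([] : List Int)) else (st.1, cur)

def hexBDecode (g : List Int) : Int :=
  g.foldl (fun v c => PySem.Int.bor (v <<< (7 : Nat)) (PySem.Int.band c 127)) 0

def hex_oid_to_string_alt (oid : List Int) : String :=
  if oid.length < 3 then "" else
    let c0 := PySem.List.pyGetD oid 0 0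
    let o1 := Int.tdiv c0 40                 -- int(oid[0] / 40), as in A
    let o2 := PySem.Int.mod c0 40
    let p := if o1 > 2 then ((2 : Int), o2 + (o1 - 2) * 40) else (o1, o2)
    let groups := ((PySem.List.slice oid (some 1) none).foldl hexBGroupStep ([], [])).1
    PySem.Str.join "."
      ([PySem.Int.toStr p.1, PySem.Int.toStr p.2] ++ groups.map (fun g => PySem.Int.toStr (hexBDecode g)))

-- ===== PRECONDITION & SPEC =====
def Spec_hex_oid_to_string (oid : List Int) (out : String) : Prop := out = hex_oid_to_string_alt oid
instance (oid : List Int) (out : String) : Decidable (Spec_hex_oid_to_string oid out) := by unfold Spec_hex_oid_to_string; infer_instance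

-- ===== CLAIM (what is proved, stated in full; the proofs are below) =====
def Claim_equal_hex_oid_to_string : Prop := ∀ (oid : List Int), Dom_hex_oid_to_string oid → Spec_hex_oid_to_string oid (hex_oid_to_string oid)

-- ===== LEMMAS AND PROOFS =====

-- specification of B's grouping loop: the groups produced from remaining bytes cs with open group cur
def hexG : List Int → List Int → List (List Int)
  | [], _ => []
  | c :: r, cur => if c < 128 then (cur ++ [c]) :: hexG r [] else hexG r (cur ++ [c])

-- '.' ++ x for each element, concatenated
def dotcat : List String → String
  | [] => ""
  | x :: xs => "." ++ x ++ dotcat xs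

theorem groupStep_fst (cs : List Int) (acc : List (List Int)) (cur : List Int) :
    (cs.foldl hexBGroupStep (acc, cur)).1 = acc ++ hexG cs cur := by
  induction cs generalizing acc cur with
  | nil => simp [hexG]
  | cons c r ih =>
    simp only [List.foldl_cons, hexBGroupStep, hexG]
    split_ifs with h <;> simp [ih]

theorem decode_snoc (cur : List Int) (c : Int) :
    hexBDecode (cur ++ [c]) = PySem.Int.bor (hexBDecode cur <<< (7 : Nat)) (PySem.Int.band c 127) := by
  simp [hexBDecode]

theorem aloop_eq (cs : List Int) (s : String) (cur : List Int) :
    (cs.foldl hexAStep (s, hexBDecode cur)).1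
      = s ++ dotcat ((hexG cs cur).map (fun g => PySem.Int.toStr (hexBDecode g))) := by
  induction cs generalizing s cur with
  | nil => simp [hexG, dotcat]
  | cons c r ih =>
    simp only [List.foldl_cons, hexG]
    by_cases h : c < 128
    · have hA : hexAStep (s, hexBDecode cur) c
          = (s ++ "." ++ PySem.Int.toStr (hexBDecode (cur ++ [c])), hexBDecode []) := by
        simp [hexAStep, h, hexBDecode]
      rw [hA, ih, if_pos h]
      simp [dotcat, String.append_assoc]
    · have hA : hexAStep (s, hexBDecode cur) c = (s, hexBDecode (cur ++ [c])) := by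
        simp [hexAStep, h, decode_snoc]
      rw [hA, ih, if_neg h]

theorem join_cons₂ (x y : String) (rest : List String) :
    PySem.Str.join "." (x :: y :: rest) = x ++ "." ++ PySem.Str.join "." (y :: rest) := by
  rw [← String.toList_inj]
  simp [PySem.Str.join, PySem.Chars.join_cons_cons]

theorem join_dot (a b : String) (xs : List String) :
    PySem.Str.join "." (a :: b :: xs) = a ++ "." ++ b ++ dotcat xs := by
  induction xs generalizing a b with
  | nil =>
    have h1 : PySem.Str.join "." [b] = b := by
      rw [← String.toList_inj]
      simp [PySem.Str.join, PySem.Chars.join, List.intercalate]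
    rw [join_cons₂, h1, dotcat, String.append_empty]
  | cons x xs ih =>
    rw [join_cons₂, ih, dotcat]
    simp [String.append_assoc]

-- ===== VERDICT (by name: the statement is the Claim_ definition above) =====
theorem hex_oid_to_string_spec : Claim_equal_hex_oid_to_string := by
  intro oid _
  unfold Spec_hex_oid_to_string hex_oid_to_string hex_oid_to_string_alt
  by_cases hlen : oid.length < 3
  · simp [hlen]
  · simp only [hlen, if_false]
    rw [groupStep_fst, List.nil_append]
    rw [show (0 : Int) = hexBDecode [] from rfl, aloop_eq]
    rw [List.cons_append, List.cons_append, List.nil_append, join_dot]
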